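-- pv_equiv track=rewrite | github.com/ljaewon97/Algorithm | Programmers/KAKAO/Level 1/비밀지도.py | solution
-- ===== SOURCE A (Python) =====
-- def solution(n, arr1, arr2):
--     answer = []
--     for i in range(n):
--         temp = bin(arr1[i] | arr2[i])[2:]
--         temp = temp.replace('1', '#')
--         temp = temp.replace('0', ' ')
--         if len(temp) < n:
--             temp = ' ' * (n - len(temp)) + temp
--         answer.append(temp)
--     return answer
-- ===== SOURCE B (Python) =====
-- def solution(n, arr1, arr2):
--     answer = []
--     for a, b in zip(arr1[:n], arr2[:n]):
--         val = a | b
--         bits = []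
--         while val:
--             bits.append('#' if val & 1 else ' ')
--             val >>= 1
--         row = ''.join(reversed(bits)) if bits else ' '
--         answer.append(row.rjust(n))
--     return answer
-- ===== Notes on version B (the rewrite author's own statement) =====
-- stated objective: alternative
-- what changed: B zips the two array prefixes and builds each row back-to-front by peeling bits off the OR value with a while loop (val & 1, val >>= 1), reversing and rjust-padding, instead of A's index loop with bin()[2:] formatting plus two str.replace passes and manual slice padding; Pre_ excludes inputs where A raises IndexError (n > array length), negative entries among the first n (B's bit-peeling loop does not terminate there), and negative n with a longer array, where A returns [] but B renders the sliced prefix.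
-- outside the precondition, e.g. on solution(-1, [1, 2], [3, 4]): A returns [], B returns ['##']; on solution(1, [-1], [0]): A returns ['b#'], B does not finish within the time limit
import Mathlib
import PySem

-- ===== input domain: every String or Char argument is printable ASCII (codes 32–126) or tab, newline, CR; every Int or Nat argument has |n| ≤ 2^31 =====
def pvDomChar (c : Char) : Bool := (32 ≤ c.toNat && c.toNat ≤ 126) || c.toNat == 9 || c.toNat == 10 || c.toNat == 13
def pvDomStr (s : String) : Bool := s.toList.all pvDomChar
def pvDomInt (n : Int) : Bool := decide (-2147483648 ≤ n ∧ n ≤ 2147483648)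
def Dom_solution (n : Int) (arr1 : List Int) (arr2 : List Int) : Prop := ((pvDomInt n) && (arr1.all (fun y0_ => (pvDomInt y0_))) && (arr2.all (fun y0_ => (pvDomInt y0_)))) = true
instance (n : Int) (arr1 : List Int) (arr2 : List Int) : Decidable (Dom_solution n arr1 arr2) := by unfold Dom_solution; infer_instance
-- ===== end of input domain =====

-- B zips the two array prefixes and peels each OR value bit by bit with a while loop
-- (build back-to-front, reverse, rjust) instead of A's bin()[2:] formatting with two
-- replace passes; objective: alternative.

-- ===== PORT A =====
-- one row of A: bin(v)[2:], replace('1','#'), replace('0',' '), left-pad to n.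
-- str.replace with one-character old/new is ported as a per-character map (exact).
def rowA (n : Int) (v : Int) : List Char :=
  let temp0 := (PySem.Int.toBinChars0b v).drop 2
  let temp1 := temp0.map (fun c => if c = '1' then '#' else c)
  let temp2 := temp1.map (fun c => if c = '0' then ' ' else c)
  if (temp2.length : Int) < n then List.replicate (n - (temp2.length : Int)).toNat ' ' ++ temp2 else temp2

def solution (n : Int) (arr1 : List Int) (arr2 : List Int) : List String :=
  (PySem.List.pyRange 0 n 1).foldl
    (fun answer i =>
      answer ++ [String.ofList (rowA n (PySem.Int.bor (PySem.List.pyGetD arr1 i 0) (PySem.List.pyGetD arr2 i 0)))])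
    []

-- ===== PORT B =====
-- 'while val: bits.append('#' if val & 1 else ' '); val >>= 1' — LSB first.
-- The 'else []' covers the loop exit (v = 0); for v < 0 Python's loop never terminates,
-- so the 0 < v guard is only a totality guard (such inputs lie outside Pre_).
def collectBits (v : Int) : List Char :=
  if 0 < v then
    (if PySem.Int.band v 1 = 1 then '#' else ' ') :: collectBits (v >>> (1:Nat))
  else []
termination_by v.toNat
decreasing_by
  rw [Int.shiftRight_eq_div_pow]
  omega

-- one row of B: reversed bit list (or a single space when empty), then rjust(n)
-- (rjust pads on the left with spaces when the row is shorter than n; exact).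
def rowB (n : Int) (v : Int) : List Char :=
  let bits := collectBits v
  let row := if bits = [] then [' '] else bits.reverse
  if (row.length : Int) < n then List.replicate (n - (row.length : Int)).toNat ' ' ++ row else row

def solution_alt (n : Int) (arr1 : List Int) (arr2 : List Int) : List String :=
  ((PySem.List.slice arr1 none (some n)).zip (PySem.List.slice arr2 none (some n))).foldl
    (fun answer p => answer ++ [String.ofList (rowB n (PySem.Int.bor p.1 p.2))]) []

-- ===== PRECONDITION & SPEC =====
-- Pre_ excludes: n > array length, where A raises IndexError; negative entries among the
-- first n, on which B's bit-peeling loop does not terminate; and negative n with a longer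
-- array, where A returns [] but B renders the sliced prefix (n ≤ -len, where B also
-- returns [], stays inside).
def Pre_solution (n : Int) (arr1 : List Int) (arr2 : List Int) : Prop :=
  n ≤ (arr1.length : Int) ∧ n ≤ (arr2.length : Int) ∧
  (∀ x ∈ arr1.take n.toNat, 0 ≤ x) ∧ (∀ x ∈ arr2.take n.toNat, 0 ≤ x) ∧
  (0 ≤ n ∨ n + (arr1.length : Int) ≤ 0 ∨ n + (arr2.length : Int) ≤ 0)
instance (n : Int) (arr1 : List Int) (arr2 : List Int) : Decidable (Pre_solution n arr1 arr2) := by unfold Pre_solution; infer_instance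

def pvWitness_solution : Int × List Int × List Int := (2, [9, 20], [30, 1])

def Spec_solution (n : Int) (arr1 : List Int) (arr2 : List Int) (out : List String) : Prop := out = solution_alt n arr1 arr2
instance (n : Int) (arr1 : List Int) (arr2 : List Int) (out : List String) : Decidable (Spec_solution n arr1 arr2 out) := by unfold Spec_solution; infer_instance

-- ===== CLAIM (what is proved, stated in full; the proofs are below) =====
def Claim_equal_solution : Prop := ∀ (n : Int) (arr1 : List Int) (arr2 : List Int), Dom_solution n arr1 arr2 → Pre_solution n arr1 arr2 → Spec_solution n arr1 arr2 (solution n arr1 arr2)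

-- ===== LEMMAS AND PROOFS =====

-- the list of binary digit characters of a Nat, most significant first (proof-side helper)
def binRec (m : Nat) : List Char :=
  if m < 2 then [Nat.digitChar m] else binRec (m / 2) ++ [Nat.digitChar (m % 2)]
  decreasing_by exact Nat.div_lt_self (by omega) (by omega)

theorem toDigitsCore_eq (fuel m : Nat) (ds : List Char) (h : m < fuel) :
    Nat.toDigitsCore 2 fuel m ds = binRec m ++ ds := by
  induction fuel generalizing m ds with
  | zero => omega
  | succ f ih =>
    rw [Nat.toDigitsCore]
    by_cases h2 : m < 2
    · have : m / 2 = 0 := by omega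
      simp only [this]
      rw [binRec]
      simp only [if_pos h2]
      interval_cases m <;> rfl
    · have hne : m / 2 ≠ 0 := by omega
      simp only [if_neg hne]
      rw [ih (m / 2) _ (by omega)]
      conv_rhs => rw [binRec]
      rw [if_neg h2, List.append_assoc]
      rfl

-- bin(v)[2:] for 0 ≤ v: the '0b' prefix sliced away leaves the binary digits
theorem toBinChars0b_drop_nonneg (v : Int) (hv : 0 ≤ v) :
    (PySem.Int.toBinChars0b v).drop 2 = binRec v.natAbs := by
  unfold PySem.Int.toBinChars0b
  rw [if_neg (by omega)]
  show Nat.toDigits 2 v.toNat = binRec v.natAbs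
  rw [show v.toNat = v.natAbs by omega, Nat.toDigits,
    toDigitsCore_eq (v.natAbs + 1) v.natAbs [] (by omega), List.append_nil]

-- unfold one step of collectBits at a positive Nat cast
theorem collectBits_natCast (m : Nat) (h : 0 < m) :
    collectBits (m : Int) =
      (if m % 2 = 1 then '#' else ' ') :: collectBits ((m / 2 : Nat) : Int) := by
  rw [collectBits.eq_def]
  have hcast : (m : Int) >>> (1 : Nat) = ((m / 2 : Nat) : Int) := by
    rw [Int.shiftRight_eq_div_pow]
    exact_mod_cast (Int.natCast_div m 2).symm
  rw [if_pos (show (0:Int) < (m:Int) by exact_mod_cast h), hcast]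
  congr 1
  rw [show (1 : Int) = ((1 : Nat) : Int) from rfl, PySem.Int.band_natCast,
    Nat.and_one_is_mod]
  by_cases hb : m % 2 = 1
  · rw [if_pos hb, if_pos (by exact_mod_cast hb)]
  · rw [if_neg hb, if_neg (by exact_mod_cast hb)]

-- B's reversed bit list is exactly A's replaced digit string, for positive values
theorem collectBits_reverse_eq (m : Nat) (h : 0 < m) :
    (collectBits (m : Int)).reverse =
      ((binRec m).map (fun c => if c = '1' then '#' else c)).map
        (fun c => if c = '0' then ' ' else c) := by
  induction m using Nat.strong_induction_on with
  | _ m ih =>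
    rw [collectBits_natCast m h, List.reverse_cons, binRec]
    by_cases h2 : m < 2
    · have hm : m = 1 := by omega
      subst hm
      rw [if_pos (by omega)]
      have hc : collectBits ((1 / 2 : Nat) : Int) = [] := by rw [collectBits.eq_def]; norm_num
      rw [hc]
      rfl
    · rw [if_neg h2, List.map_append, List.map_append,
        ih (m / 2) (Nat.div_lt_self (by omega) (by omega)) (by omega)]
      congr 1
      have := Nat.mod_two_eq_zero_or_one m
      rcases this with hb | hb <;> rw [hb] <;> rfl

-- collectBits of a positive value is nonempty
theorem collectBits_ne_nil (m : Nat) (h : 0 < m) : collectBits (m : Int) ≠ [] := by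
  rw [collectBits_natCast m h]
  exact List.cons_ne_nil _ _

theorem row_eq_nat (n : Int) (m : Nat) : rowA n (m : Int) = rowB n (m : Int) := by
  simp only [rowA, rowB]
  rw [toBinChars0b_drop_nonneg (m : Int) (Int.natCast_nonneg m), Int.natAbs_natCast]
  by_cases h0 : m = 0
  · subst h0
    have hc : collectBits ((0 : Nat) : Int) = [] := by rw [collectBits.eq_def]; norm_num
    have hb : binRec 0 = ['0'] := by rw [binRec]; rfl
    rw [hc, hb]
    rfl
  · rw [if_neg (collectBits_ne_nil m (by omega)),
      collectBits_reverse_eq m (by omega)]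

-- ===== VERDICT (by name: the statement is the Claim_ definition above) =====
-- a slice xs[:n] with n ≤ -len is empty
theorem slice_neg_big {xs : List Int} {n : Int} (h : n + (xs.length : Int) ≤ 0) (hn : n < 0) :
    PySem.List.slice xs none (some n) = [] := by
  rw [show n = -(((-n).toNat : Nat) : Int) by omega,
    PySem.List.slice_to_neg_natCast xs (-n).toNat (by omega),
    show xs.length - (-n).toNat = 0 by omega, List.take_zero]

theorem solution_spec : Claim_equal_solution := by
  intro n arr1 arr2 _hdom hpre
  obtain ⟨hn1, hn2, hpos1, hpos2, hcase⟩ := hpre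
  show solution n arr1 arr2 = solution_alt n arr1 arr2
  by_cases hn0 : 0 ≤ n
  case neg =>
    -- n < 0: A's range is empty and one sliced prefix is empty, so both return []
    have hn : n < 0 := by omega
    have hA : solution n arr1 arr2 = [] := by
      unfold solution
      rw [PySem.List.pyRange_one, show (n - 0).toNat = 0 by omega]
      rfl
    have hB : solution_alt n arr1 arr2 = [] := by
      unfold solution_alt
      rcases hcase with h | h | h
      · omega
      · rw [slice_neg_big h hn, List.zip_nil_left]
        rfl
      · rw [slice_neg_big h hn, List.zip_nil_right]
        rfl
    rw [hA, hB]
  case pos =>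
  unfold solution solution_alt
  rw [PySem.List.foldl_append_singleton_eq_map, PySem.List.foldl_append_singleton_eq_map,
    List.nil_append, List.nil_append,
    PySem.List.slice_to arr1 hn0, PySem.List.slice_to arr2 hn0,
    PySem.List.pyRange_one]
  have hlen1 : (arr1.take n.toNat).length = n.toNat := by
    rw [List.length_take]; omega
  have hlen2 : (arr2.take n.toNat).length = n.toNat := by
    rw [List.length_take]; omega
  apply List.ext_getElem
  · simp only [List.length_map, List.length_range, List.length_zip, hlen1, hlen2,
      Nat.min_self, Int.sub_zero]
  · intro k hk1 hk2
    simp only [List.length_map, List.length_range, Int.sub_zero] at hk1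
    simp only [List.getElem_map, List.getElem_range, List.getElem_zip]
    have hg1 : PySem.List.pyGetD arr1 (0 + (k : Int)) 0 = arr1[k]'(by omega) := by
      rw [Int.zero_add, PySem.List.pyGetD_eq_getElem arr1 (0 : Int) (Int.natCast_nonneg k)
        (by exact_mod_cast (show k < arr1.length by omega))]
      simp
    have hg2 : PySem.List.pyGetD arr2 (0 + (k : Int)) 0 = arr2[k]'(by omega) := by
      rw [Int.zero_add, PySem.List.pyGetD_eq_getElem arr2 (0 : Int) (Int.natCast_nonneg k)
        (by exact_mod_cast (show k < arr2.length by omega))]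
      simp
    have ht1 : (arr1.take n.toNat)[k]'(by omega) = arr1[k]'(by omega) := List.getElem_take
    have ht2 : (arr2.take n.toNat)[k]'(by omega) = arr2[k]'(by omega) := List.getElem_take
    rw [hg1, hg2, ht1, ht2]
    have ha : (0 : Int) ≤ arr1[k]'(by omega) := by
      apply hpos1
      exact ht1 ▸ List.getElem_mem _
    have hb : (0 : Int) ≤ arr2[k]'(by omega) := by
      apply hpos2
      exact ht2 ▸ List.getElem_mem _
    rw [PySem.Int.bor_of_nonneg ha hb]
    congr 1
    exact row_eq_nat n _
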